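-- pv_equiv track=rewrite | github.com/jacobianjl/binarysearch-solutions | kprefix.py | solve
-- ===== SOURCE A (Python) =====
-- def solve(nums, k):
--     sum = 0
--     position = -1
--     for index, value in enumerate(nums):
--         sum += value
--         if sum <= k:
--             position = index
--     return position
-- ===== SOURCE B (Python) =====
-- def solve(nums, k):
--     prefixes = []
--     s = 0
--     for v in nums:
--         s += v
--         prefixes.append(s)
--     for i in range(len(prefixes) - 1, -1, -1):
--         if prefixes[i] <= k:
--             return i
--     return -1
-- ===== Notes on version B (the rewrite author's own statement) =====
-- stated objective: alternative
-- what changed: Replaces A's single fused loop that keeps overwriting the answer with a two-phase shape: first build the full prefix-sum array, then scan it backwards with an early return at the last index whose prefix sum is <= k.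
import Mathlib
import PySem

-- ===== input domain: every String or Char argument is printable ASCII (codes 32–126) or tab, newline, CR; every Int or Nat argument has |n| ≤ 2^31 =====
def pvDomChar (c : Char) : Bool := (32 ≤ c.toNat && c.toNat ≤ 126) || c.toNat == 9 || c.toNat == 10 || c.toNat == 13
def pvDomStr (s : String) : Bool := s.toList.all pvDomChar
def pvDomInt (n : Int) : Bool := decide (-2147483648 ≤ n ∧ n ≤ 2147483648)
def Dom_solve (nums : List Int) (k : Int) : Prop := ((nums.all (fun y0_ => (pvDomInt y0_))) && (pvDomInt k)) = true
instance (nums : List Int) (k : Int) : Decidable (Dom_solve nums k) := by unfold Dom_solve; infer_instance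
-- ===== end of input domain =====

-- B builds the prefix-sum array first, then scans it backwards returning the first qualifying index (= A's last): same O(n) cost, different two-phase decomposition.

-- ===== PORT A =====
-- A: one fused loop over enumerate(nums), accumulating the sum and overwriting position.
def solve (nums : List Int) (k : Int) : Int :=
  ((PySem.List.enumerate nums 0).foldl
    (fun (st : Int × Int) (iv : Int × Int) =>
      let s := st.1 + iv.2
      (s, if s ≤ k then iv.1 else st.2))
    (0, -1)).2

-- ===== PORT B =====
-- phase 1 of Source B: build the prefix-sum list (state: list built so far, running sum)
def prefixSums (nums : List Int) : List Int :=
  (nums.foldl (fun (acc : List Int × Int) v =>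
    let s := acc.2 + v
    (acc.1 ++ [s], s)) ([], 0)).1

-- phase 2 of Source B: 'for i in range(len(prefixes)-1, -1, -1): if prefixes[i] <= k: return i' with early
-- return, hand-ported as recursion on the count of remaining indices; getD is exact since i < length.
def backScan (prefixes : List Int) (k : Int) : Nat → Int
  | 0 => -1
  | n + 1 => if prefixes.getD n 0 ≤ k then (n : Int) else backScan prefixes k n

def solve_alt (nums : List Int) (k : Int) : Int :=
  backScan (prefixSums nums) k (prefixSums nums).length

-- ===== PRECONDITION & SPEC =====
def Spec_solve (nums : List Int) (k : Int) (out : Int) : Prop := out = solve_alt nums k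
instance (nums : List Int) (k : Int) (out : Int) : Decidable (Spec_solve nums k out) := by unfold Spec_solve; infer_instance

-- ===== CLAIM (what is proved, stated in full; the proofs are below) =====
def Claim_equal_solve : Prop := ∀ (nums : List Int) (k : Int), Dom_solve nums k → Spec_solve nums k (solve nums k)

-- ===== LEMMAS AND PROOFS =====

-- the sum component of A's fold is the running total
theorem foldA_fst (nums : List Int) (k s0 : Int) (i : Int) (p : Int) :
    ((PySem.List.enumerate nums i).foldl
      (fun (st : Int × Int) (iv : Int × Int) =>
        let s := st.1 + iv.2
        (s, if s ≤ k then iv.1 else st.2)) (s0, p)).1 = s0 + nums.sum := by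
  induction nums generalizing i s0 p with
  | nil => simp [PySem.List.enumerate_nil]
  | cons x xs ih => simp [PySem.List.enumerate_cons, List.foldl_cons, ih]; ring

-- the list component of B's phase-1 fold appends the prefixes; the sum component is the total
theorem foldB_eq (nums : List Int) (l : List Int) (s0 : Int) :
    (nums.foldl (fun (acc : List Int × Int) v =>
      let s := acc.2 + v
      (acc.1 ++ [s], s)) (l, s0)) =
    (l ++ (nums.foldl (fun (acc : List Int × Int) v =>
      let s := acc.2 + v
      (acc.1 ++ [s], s)) ([], s0)).1, s0 + nums.sum) := by
  induction nums generalizing l s0 with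
  | nil => simp
  | cons x xs ih =>
    simp only [List.foldl_cons]
    rw [ih]
    simp only [List.nil_append]
    rw [ih (l := [s0 + x]) (s0 := s0 + x)]
    simp; ring

theorem prefixSums_append (nums : List Int) (x : Int) :
    prefixSums (nums ++ [x]) = prefixSums nums ++ [nums.sum + x] := by
  unfold prefixSums
  rw [List.foldl_append]
  simp only [List.foldl_cons, List.foldl_nil]
  rw [foldB_eq]
  have h := foldB_eq nums [] 0
  rw [h]
  simp

theorem prefixSums_length (nums : List Int) : (prefixSums nums).length = nums.length := by
  induction nums using List.reverseRecOn with
  | nil => rfl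
  | append_singleton xs x ih => rw [prefixSums_append]; simp [ih]

-- backScan only inspects indices below m, so an appended element is irrelevant
theorem backScan_append (l : List Int) (x k : Int) (m : Nat) (hm : m ≤ l.length) :
    backScan (l ++ [x]) k m = backScan l k m := by
  induction m with
  | zero => rfl
  | succ n ih =>
    have hn : n < l.length := by omega
    simp [backScan, List.getD, List.getElem?_append_left hn, ih (by omega)]

theorem solve_eq_alt (nums : List Int) (k : Int) : solve nums k = solve_alt nums k := by
  induction nums using List.reverseRecOn with
  | nil => rfl
  | append_singleton xs x ih =>
    unfold solve solve_alt
    rw [PySem.List.enumerate_append, List.foldl_append]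
    simp only [PySem.List.enumerate_cons, PySem.List.enumerate_nil, List.foldl_cons, List.foldl_nil]
    rw [prefixSums_append]
    have hlen := prefixSums_length xs
    have hget : (prefixSums xs ++ [xs.sum + x]).getD xs.length 0 = xs.sum + x := by
      simp [List.getD, hlen]
    have hfst : ((PySem.List.enumerate xs 0).foldl
        (fun (st : Int × Int) (iv : Int × Int) =>
          let s := st.1 + iv.2
          (s, if s ≤ k then iv.1 else st.2)) ((0 : Int), (-1 : Int))).1 = xs.sum := by
      simpa using foldA_fst xs k 0 0 (-1)
    have hlen2 : (prefixSums xs ++ [xs.sum + x]).length = xs.length + 1 := by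
      simp [hlen]
    rw [hlen2, backScan, hget]
    simp only [hfst, zero_add]
    split_ifs with h
    · rfl
    · rw [backScan_append _ _ _ _ hlen.symm.le]
      rw [show backScan (prefixSums xs) k xs.length = solve_alt xs k by
        unfold solve_alt; rw [hlen]]
      exact ih

-- ===== VERDICT (by name: the statement is the Claim_ definition above) =====
theorem solve_spec : Claim_equal_solve := by
  intro nums k _
  unfold Spec_solve
  exact solve_eq_alt nums k
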